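-- pv_equiv track=rewrite | github.com/fkguo/autoresearch-lab | skills/research-team/scripts/bin/generate_demo_milestone.py | _safe_tag
-- ===== SOURCE A (Python) =====
-- def _safe_tag(tag: str) -> str | None:
--     t = tag.strip()
--     if not t:
--         return None
--     # Keep filenames safe: no whitespace or path separators.
--     if any(ch.isspace() for ch in t):
--         return None
--     if "/" in t or "\\" in t:
--         return None
--     if len(t) > 64:
--         return None
--     return t
-- ===== SOURCE B (Python) =====
-- def _safe_tag(tag: str) -> str | None:
--     # Sanitize-and-compare: build a copy of the stripped tag with every
--     # unsafe character (whitespace, path separators) removed; the tag is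
--     # safe exactly when nothing was removed and the length fits.
--     t = tag.strip()
--     bad = set("/\\")
--     cleaned = "".join(ch for ch in t if not ch.isspace() and ch not in bad)
--     return t if cleaned == t and 0 < len(t) <= 64 else None
-- ===== Notes on version B (the rewrite author's own statement) =====
-- stated objective: alternative
-- what changed: Replaces A's early-return chain of rejection scans (any(isspace), two substring tests) with a sanitize-and-compare validation: B builds a copy of the stripped tag with all unsafe characters filtered out and accepts iff that copy equals the original and the length fits, in a single return expression.
import Mathlib
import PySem

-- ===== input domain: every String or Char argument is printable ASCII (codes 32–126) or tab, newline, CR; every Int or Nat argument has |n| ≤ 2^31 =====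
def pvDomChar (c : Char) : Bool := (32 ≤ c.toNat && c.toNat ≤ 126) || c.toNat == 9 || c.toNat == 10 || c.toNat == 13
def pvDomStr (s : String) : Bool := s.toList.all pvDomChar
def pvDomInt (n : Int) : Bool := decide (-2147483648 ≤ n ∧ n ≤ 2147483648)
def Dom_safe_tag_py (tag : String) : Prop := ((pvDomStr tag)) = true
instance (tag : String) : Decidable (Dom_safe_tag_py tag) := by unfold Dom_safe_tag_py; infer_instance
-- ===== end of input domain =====

-- B replaces A's chain of rejection scans with a sanitize-and-compare validation (filter out unsafe characters, accept iff nothing was removed); alternative decomposition, same cost.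


-- ===== PORT A =====
def safe_tag_py (tag : String) : Option String :=
  let t := PySem.Str.strip tag
  if t == "" then none
  else if t.toList.any (fun ch => PySem.Chars.isspace ch) then none
  else if PySem.Str.isIn "/" t || PySem.Str.isIn "\\" t then none
  else if PySem.Str.len t > 64 then none
  else some t

-- ===== PORT B =====
def safe_tag_py_alt (tag : String) : Option String :=
  let t := PySem.Str.strip tag
  let bad := PySem.Set.ofList ['/', '\\']
  -- ''.join(ch for ch in t if not ch.isspace() and ch not in bad), the kept characters as 1-char strings
  let cleaned := PySem.Chars.join []
    ((t.toList.filter (fun ch => !(PySem.Chars.isspace ch) && !(PySem.Set.contains bad ch))).map (fun c => [c]))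
  if cleaned == t.toList && (0 < PySem.Str.len t && PySem.Str.len t ≤ 64) then some t else none

-- ===== PRECONDITION & SPEC =====
def Spec_safe_tag_py (tag : String) (out : Option String) : Prop := out = safe_tag_py_alt tag
instance (tag : String) (out : Option String) : Decidable (Spec_safe_tag_py tag out) := by unfold Spec_safe_tag_py; infer_instance

-- ===== CLAIM (what is proved, stated in full; the proofs are below) =====
def Claim_equal_safe_tag_py : Prop := ∀ (tag : String), Dom_safe_tag_py tag → Spec_safe_tag_py tag (safe_tag_py tag)

-- ===== LEMMAS AND PROOFS =====

-- B's keep-predicate holds of every character of a list iff the filter removed nothing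
theorem cleaned_eq_iff (l : List Char) :
    (PySem.Chars.join [] ((l.filter (fun ch => !(PySem.Chars.isspace ch) && !(PySem.Set.contains (PySem.Set.ofList ['/', '\\']) ch))).map (fun c => [c])) = l)
    ↔ ∀ c ∈ l, (!(PySem.Chars.isspace c) && !(PySem.Set.contains (PySem.Set.ofList ['/', '\\']) c)) = true := by
  rw [PySem.Chars.join_nil_singletons]
  exact List.filter_eq_self

theorem contains_bad_iff (c : Char) :
    PySem.Set.contains (PySem.Set.ofList ['/', '\\']) c = true ↔ c = '/' ∨ c = '\\' := by
  rw [PySem.Set.contains_iff, PySem.Set.mem_ofList]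
  simp

theorem chars_isIn_single_iff (c : Char) (l : List Char) :
    PySem.Chars.isIn [c] l = true ↔ c ∈ l := by
  rw [PySem.Chars.isIn_iff_infix]
  exact List.singleton_infix_iff c l

theorem bodies_eq (t : String) :
    (if t == "" then none
     else if t.toList.any (fun ch => PySem.Chars.isspace ch) then none
     else if PySem.Str.isIn "/" t || PySem.Str.isIn "\\" t then none
     else if PySem.Str.len t > 64 then none
     else some t) =
    (if PySem.Chars.join [] ((t.toList.filter (fun ch => !(PySem.Chars.isspace ch) && !(PySem.Set.contains (PySem.Set.ofList ['/', '\\']) ch))).map (fun c => [c])) == t.toList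
        && (0 < PySem.Str.len t && PySem.Str.len t ≤ 64) then some t else none) := by
  by_cases he : t = ""
  · subst he
    simp [PySem.Chars.join]
  · have he' : (t == "") = false := by simpa using he
    have hnil : t.toList ≠ [] := fun hh => he (String.toList_eq_nil_iff.mp hh)
    have hposn : 0 < t.toList.length := List.length_pos_iff.mpr hnil
    by_cases hall : ∀ c ∈ t.toList, (!(PySem.Chars.isspace c) && !(PySem.Set.contains (PySem.Set.ofList ['/', '\\']) c)) = true
    · -- every character is kept: both sides reduce to the length test
      have hc1 : (PySem.Chars.join [] ((t.toList.filter (fun ch => !(PySem.Chars.isspace ch) && !(PySem.Set.contains (PySem.Set.ofList ['/', '\\']) ch))).map (fun c => [c])) == t.toList) = true := by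
        rw [beq_iff_eq]; exact (cleaned_eq_iff t.toList).mpr hall
      have hs : (t.toList.any (fun ch => PySem.Chars.isspace ch)) = false := by
        rw [List.any_eq_false]
        intro c hc
        have := hall c hc
        simp only [Bool.and_eq_true, Bool.not_eq_true'] at this
        simp [this.1]
      have hslash : (PySem.Str.isIn "/" t || PySem.Str.isIn "\\" t) = false := by
        have h1 : '/' ∉ t.toList := fun hmem => by
          have := hall _ hmem
          simp at this
        have h2 : '\\' ∉ t.toList := fun hmem => by
          have := hall _ hmem
          simp at this
        simp only [PySem.Str.isIn_eq, Bool.or_eq_false_iff]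
        constructor
        · exact Bool.eq_false_iff.mpr (fun hc => h1 ((chars_isIn_single_iff '/' t.toList).mp hc))
        · exact Bool.eq_false_iff.mpr (fun hc => h2 ((chars_isIn_single_iff '\\' t.toList).mp hc))
      rw [hc1]
      simp only [he', Bool.false_eq_true, if_false, hs, hslash, PySem.Str.len_eq, Bool.true_and]
      -- the two length tests agree: close every combination arithmetically
      split_ifs with h1 h2 h3 <;>
        first
          | rfl
          | (exfalso
             simp only [Bool.and_eq_true, decide_eq_true_eq] at *
             omega)
    · -- some character is unsafe: both sides are none
      simp only [not_forall] at hall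
      obtain ⟨c, hc, hbadc⟩ := hall
      have hc1 : (PySem.Chars.join [] ((t.toList.filter (fun ch => !(PySem.Chars.isspace ch) && !(PySem.Set.contains (PySem.Set.ofList ['/', '\\']) ch))).map (fun c => [c])) == t.toList) = false := by
        rw [beq_eq_false_iff_ne]
        intro hcl
        exact hbadc ((cleaned_eq_iff t.toList).mp hcl c hc)
      rw [hc1]
      simp only [Bool.false_and, Bool.false_eq_true, if_false]
      have : PySem.Chars.isspace c = true ∨ c = '/' ∨ c = '\\' := by
        by_contra hcon
        rw [not_or, not_or] at hcon
        apply hbadc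
        have hns : PySem.Chars.isspace c = false := Bool.eq_false_iff.mpr hcon.1
        have hnc : PySem.Set.contains (PySem.Set.ofList ['/', '\\']) c = false := by
          rw [Bool.eq_false_iff]
          intro h
          rcases (contains_bad_iff c).mp h with h | h
          · exact hcon.2.1 h
          · exact hcon.2.2 h
        rw [hns, hnc]
        rfl
      rcases this with hsp | hrest
      · have hs : (t.toList.any (fun ch => PySem.Chars.isspace ch)) = true :=
          List.any_eq_true.mpr ⟨c, hc, hsp⟩
        simp [he', hs]
      · have hsl : PySem.Chars.isIn ['/'] t.toList = true ∨ PySem.Chars.isIn ['\\'] t.toList = true := by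
          rcases hrest with h | h
          · exact Or.inl ((chars_isIn_single_iff '/' t.toList).mpr (h ▸ hc))
          · exact Or.inr ((chars_isIn_single_iff '\\' t.toList).mpr (h ▸ hc))
        by_cases hs : (t.toList.any (fun ch => PySem.Chars.isspace ch)) = true
        · simp [he', hs]
        · rcases hsl with h | h <;> simp [he', hs, h]

-- ===== VERDICT (by name: the statement is the Claim_ definition above) =====
theorem safe_tag_py_spec : Claim_equal_safe_tag_py := by
  intro tag _
  show safe_tag_py tag = safe_tag_py_alt tag
  simp only [safe_tag_py, safe_tag_py_alt]
  exact bodies_eq (PySem.Str.strip tag)
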